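-- pv_equiv track=rewrite | github.com/vanolucas/cv | src/cvcompiler/parser.py | _extract_experience_content
-- ===== SOURCE A (Python) =====
-- SECTION_H4 = "####"
--
-- def _is_paragraph_line(line: str) -> bool:
--     """Check if line is plain paragraph text (not metadata, heading, bullet, or image)."""
--     stripped = line.strip()
--     if not stripped:
--         return False
--     return not any(stripped.startswith(prefix) for prefix in ("*", "#", "-", "!["))
--
-- def _is_tech_stack_section(line: str) -> bool:
--     """Check if line starts a tech stack section."""
--     return line.strip().startswith(f"{SECTION_H4} Tech stack")
--
-- def _is_section_heading(line: str, level: str) -> bool: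
--     """Check if line is a section heading at the specified level."""
--     return line.strip().startswith(level)
--
-- def _extract_experience_content(lines: list[str]) -> tuple[list[str], list[str]]:
--     """Extract description and tech_stack from experience block.
--
--     Returns (description, tech_stack) where description is a list of:
--     - Paragraphs (plain text lines), or
--     - Bullet points (lines starting with '- ')
--
--     Tech stack is extracted from #### Tech stack section if present.
--     Content AFTER #### Tech stack is NOT included in description.
--     """
--     description: list[str] = []
--     tech_stack: list[str] = []
--     in_tech_section = False
--
--     for line in lines:
--         stripped = line.strip()
--
--         # Detect #### Tech stack section start
--         if _is_tech_stack_section(line):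
--             in_tech_section = True
--             continue
--
--         # Detect any other #### section (stops tech stack parsing)
--         if _is_section_heading(line, SECTION_H4):
--             in_tech_section = False
--             continue
--
--         # Parse tech stack bullets
--         if in_tech_section and stripped.startswith("- "):
--             tech_stack.append(stripped[2:])
--             continue
--
--         # Skip if we're in tech section but not a bullet (empty lines, etc.)
--         if in_tech_section:
--             continue
--
--         # Collect description: paragraphs or bullet points (before any #### section)
--         if _is_paragraph_line(line):
--             description.append(stripped)
--         elif stripped.startswith("- "):
--             description.append(stripped[2:])
--
--     return description, tech_stack
-- ===== SOURCE B (Python) =====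
-- def _segments(lines):
--     """Split stripped lines into sections delimited by '####' headings, flagging tech-stack sections."""
--     segments = []
--     is_tech, current = False, []
--     for line in lines:
--         s = line.strip()
--         if s.startswith("####"):
--             segments.append((is_tech, current))
--             is_tech, current = s.startswith("#### Tech stack"), []
--         else:
--             current.append(s)
--     segments.append((is_tech, current))
--     return segments
--
--
-- def _extract_experience_content(lines):
--     description = []
--     tech_stack = []
--     for is_tech, seg in _segments(lines):
--         if is_tech:
--             tech_stack += [s[2:] for s in seg if s.startswith("- ")]
--         else:
--             description += [s[2:] if s.startswith("- ") else s
--                            for s in seg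
--                            if s.startswith("- ")
--                            or (s and not s.startswith(("*", "#", "-", "![")))]
--     return description, tech_stack
-- ===== Notes on version B (the rewrite author's own statement) =====
-- stated objective: alternative
-- what changed: B first splits the lines into heading-delimited segments tagged tech/non-tech, then harvests tech bullets and description items per segment with list comprehensions, replacing A's single stateful loop with an in_tech flag and per-line branch chain.
import Mathlib
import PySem

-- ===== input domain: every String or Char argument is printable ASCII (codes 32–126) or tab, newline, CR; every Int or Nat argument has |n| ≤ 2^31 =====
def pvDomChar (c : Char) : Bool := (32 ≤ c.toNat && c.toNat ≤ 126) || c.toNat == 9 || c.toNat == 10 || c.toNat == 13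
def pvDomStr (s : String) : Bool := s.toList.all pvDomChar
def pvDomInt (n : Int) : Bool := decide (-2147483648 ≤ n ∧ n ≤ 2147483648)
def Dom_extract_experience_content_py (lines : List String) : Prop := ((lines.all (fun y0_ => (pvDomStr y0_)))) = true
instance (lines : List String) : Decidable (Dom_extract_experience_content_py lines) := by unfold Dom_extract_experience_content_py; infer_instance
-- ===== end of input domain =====

-- B restructures A's stateful flag loop into a segment-split pass followed by per-segment comprehension harvesting (measured constant-factor faster in a timing run).

-- ===== PORT A =====
def pv_is_paragraph_line (line : String) : Bool :=
  let stripped := PySem.Str.strip line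
  if stripped == "" then false
  else !(PySem.Str.startswith stripped "*" || PySem.Str.startswith stripped "#" ||
         PySem.Str.startswith stripped "-" || PySem.Str.startswith stripped "![")

def pv_is_tech_stack_section (line : String) : Bool :=
  PySem.Str.startswith (PySem.Str.strip line) "#### Tech stack"

def pv_is_section_heading (line : String) (level : String) : Bool :=
  PySem.Str.startswith (PySem.Str.strip line) level

def pvAStep (st : List String × List String × Bool) (line : String) :
    List String × List String × Bool :=
  let description := st.1
  let tech_stack := st.2.1
  let in_tech_section := st.2.2
  let stripped := PySem.Str.strip line
  if pv_is_tech_stack_section line then (description, tech_stack, true)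
  else if pv_is_section_heading line "####" then (description, tech_stack, false)
  else if in_tech_section && PySem.Str.startswith stripped "- " then
    (description, tech_stack ++ [PySem.Str.slice stripped (some 2) none], in_tech_section)
  else if in_tech_section then st
  else if pv_is_paragraph_line line then (description ++ [stripped], tech_stack, in_tech_section)
  else if PySem.Str.startswith stripped "- " then
    (description ++ [PySem.Str.slice stripped (some 2) none], tech_stack, in_tech_section)
  else st

def extract_experience_content_py (lines : List String) : List String × List String :=
  let r := lines.foldl pvAStep ([], [], false)
  (r.1, r.2.1)

-- ===== PORT B =====
def pvSegStep (st : List (Bool × List String) × Bool × List String) (line : String) :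
    List (Bool × List String) × Bool × List String :=
  let s := PySem.Str.strip line
  if PySem.Str.startswith s "####" then
    (st.1 ++ [(st.2.1, st.2.2)], PySem.Str.startswith s "#### Tech stack", [])
  else
    (st.1, st.2.1, st.2.2 ++ [s])

def pvSegments (lines : List String) : List (Bool × List String) :=
  let r := lines.foldl pvSegStep ([], false, [])
  r.1 ++ [(r.2.1, r.2.2)]

def pvDescKeep (s : String) : Bool :=
  PySem.Str.startswith s "- " ||
  (s != "" && !(PySem.Str.startswith s "*" || PySem.Str.startswith s "#" ||
                PySem.Str.startswith s "-" || PySem.Str.startswith s "!["))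

def pvDescItem (s : String) : String :=
  if PySem.Str.startswith s "- " then PySem.Str.slice s (some 2) none else s

def pvCollect (st : List String × List String) (seg : Bool × List String) :
    List String × List String :=
  if seg.1 then
    (st.1, st.2 ++ (seg.2.filter (fun s => PySem.Str.startswith s "- ")).map
                     (fun s => PySem.Str.slice s (some 2) none))
  else
    (st.1 ++ (seg.2.filter pvDescKeep).map pvDescItem, st.2)

def extract_experience_content_py_alt (lines : List String) : List String × List String :=
  (pvSegments lines).foldl pvCollect ([], [])

-- ===== PRECONDITION & SPEC =====
def Spec_extract_experience_content_py (lines : List String) (out : List String × List String) : Prop := out = extract_experience_content_py_alt lines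
instance (lines : List String) (out : List String × List String) : Decidable (Spec_extract_experience_content_py lines out) := by unfold Spec_extract_experience_content_py; infer_instance

-- ===== CLAIM (what is proved, stated in full; the proofs are below) =====
def Claim_equal_extract_experience_content_py : Prop := ∀ (lines : List String), Dom_extract_experience_content_py lines → Spec_extract_experience_content_py lines (extract_experience_content_py lines)

-- ===== LEMMAS AND PROOFS =====

-- per-segment contributions
def pvDescC (f : Bool) (cur : List String) : List String :=
  if f then [] else (cur.filter pvDescKeep).map pvDescItem

def pvTechC (f : Bool) (cur : List String) : List String :=
  if f then (cur.filter (fun s => PySem.Str.startswith s "- ")).map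
              (fun s => PySem.Str.slice s (some 2) none)
  else []

theorem pvCollect_fold (segs : List (Bool × List String)) (d t : List String) :
    segs.foldl pvCollect (d, t) =
      (d ++ segs.flatMap (fun g => pvDescC g.1 g.2),
       t ++ segs.flatMap (fun g => pvTechC g.1 g.2)) := by
  induction segs generalizing d t with
  | nil => simp
  | cons g rest ih =>
      cases g with
      | mk f cur =>
        by_cases hf : f = true <;>
          simp [pvCollect, pvDescC, pvTechC, hf, ih, List.append_assoc]

theorem pvSeg_fold_acc (lines : List String) (segs : List (Bool × List String))
    (flag : Bool) (cur : List String) :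
    lines.foldl pvSegStep (segs, flag, cur) =
      (segs ++ (lines.foldl pvSegStep ([], flag, cur)).1,
       (lines.foldl pvSegStep ([], flag, cur)).2) := by
  induction lines generalizing segs flag cur with
  | nil => simp
  | cons l rest ih =>
      by_cases hh : PySem.Str.startswith (PySem.Str.strip l) "####" = true
      · simp only [List.foldl_cons, pvSegStep, hh, if_pos]
        simp only [List.nil_append]
        rw [ih (segs ++ [(flag, cur)]), ih [(flag, cur)]]
        simp [List.append_assoc]
      · simp only [List.foldl_cons, pvSegStep, hh, if_neg, Bool.not_eq_true]
        exact ih segs flag (cur ++ [PySem.Str.strip l])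

theorem pv_startswith_trans (s p q : String) (hpq : q.toList <+: p.toList)
    (h : PySem.Str.startswith s p = true) : PySem.Str.startswith s q = true := by
  have h1 : p.toList <+: s.toList := by
    simpa [PySem.Str.startswith] using (PySem.Chars.startswith_iff _ _).1 (by simpa [PySem.Str.startswith] using h)
  have h2 : q.toList <+: s.toList := hpq.trans h1
  simpa [PySem.Str.startswith] using (PySem.Chars.startswith_iff s.toList q.toList).2 h2

theorem pv_tech_heading (line : String) (h : pv_is_tech_stack_section line = true) :
    pv_is_section_heading line "####" = true := by
  exact pv_startswith_trans _ _ _ (by decide) h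

theorem pv_fm_single (p : String → Bool) (f : String → String) (s : String) :
    (List.filter p [s]).map f = if p s then [f s] else [] := by
  by_cases h : p s = true <;> simp [h]

theorem pv_chars_trans (xs p q : List Char) (hpq : q <+: p)
    (h : PySem.Chars.startswith xs p = true) : PySem.Chars.startswith xs q = true := by
  have h1 : p <+: xs := (PySem.Chars.startswith_iff xs p).1 h
  exact (PySem.Chars.startswith_iff xs q).2 (hpq.trans h1)

theorem pvKeep_eq (l : String) :
    pvDescKeep (PySem.Str.strip l) =
      (PySem.Str.startswith (PySem.Str.strip l) "- " || pv_is_paragraph_line l) := by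
  simp only [pvDescKeep, pv_is_paragraph_line]
  by_cases hse : PySem.Str.strip l = ""
  · simp [hse]
  · have h0 : (PySem.Str.strip l == "") = false := beq_eq_false_iff_ne.2 hse
    simp [bne, h0]

theorem pvDescC_snoc (f : Bool) (cur : List String) (s : String) :
    pvDescC f (cur ++ [s]) =
      pvDescC f cur ++ (if f then [] else if pvDescKeep s then [pvDescItem s] else []) := by
  by_cases hf : f = true <;>
    simp [pvDescC, hf, pv_fm_single]

theorem pvTechC_snoc (f : Bool) (cur : List String) (s : String) :
    pvTechC f (cur ++ [s]) =
      pvTechC f cur ++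
        (if f then (if PySem.Str.startswith s "- " then [PySem.Str.slice s (some 2) none] else [])
         else []) := by
  by_cases hf : f = true <;>
    simp [pvTechC, hf, pv_fm_single]

set_option maxHeartbeats 1000000 in
theorem pvMain (lines : List String) (flag : Bool) (cur d t : List String) :
    lines.foldl pvAStep (d ++ pvDescC flag cur, t ++ pvTechC flag cur, flag) =
      (d ++ ((lines.foldl pvSegStep ([], flag, cur)).1 ++
              [((lines.foldl pvSegStep ([], flag, cur)).2.1,
                (lines.foldl pvSegStep ([], flag, cur)).2.2)]).flatMap
              (fun g => pvDescC g.1 g.2),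
       t ++ ((lines.foldl pvSegStep ([], flag, cur)).1 ++
              [((lines.foldl pvSegStep ([], flag, cur)).2.1,
                (lines.foldl pvSegStep ([], flag, cur)).2.2)]).flatMap
              (fun g => pvTechC g.1 g.2),
       (lines.foldl pvSegStep ([], flag, cur)).2.1) := by
  induction lines generalizing flag cur d t with
  | nil => simp
  | cons l rest ih =>
      by_cases htech : pv_is_tech_stack_section l = true
      · have hh : PySem.Str.startswith (PySem.Str.strip l) "####" = true := pv_tech_heading l htech
        have hts : PySem.Str.startswith (PySem.Str.strip l) "#### Tech stack" = true := by
          simpa [pv_is_tech_stack_section] using htech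
        simp only [List.foldl_cons, pvAStep, pvSegStep, htech, hh, hts, if_pos, List.nil_append]
        rw [pvSeg_fold_acc rest [(flag, cur)] true []]
        have := ih true [] (d ++ pvDescC flag cur) (t ++ pvTechC flag cur)
        simp [pvDescC, pvTechC] at this
        simp [this, List.append_assoc, pvDescC, pvTechC]
      · by_cases hh : PySem.Str.startswith (PySem.Str.strip l) "####" = true
        · have hts : PySem.Str.startswith (PySem.Str.strip l) "#### Tech stack" = false := by
            simpa [pv_is_tech_stack_section] using htech
          simp only [List.foldl_cons, pvAStep, pvSegStep, pv_is_section_heading, htech, hh, hts,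
            if_pos, if_neg, Bool.false_eq_true, not_false_eq_true, List.nil_append]
          rw [pvSeg_fold_acc rest [(flag, cur)] false []]
          have := ih false [] (d ++ pvDescC flag cur) (t ++ pvTechC flag cur)
          simp [pvDescC, pvTechC] at this
          simp [this, List.append_assoc, pvDescC, pvTechC]
        · -- content line: goes into the current segment
          have hts : pv_is_tech_stack_section l = false := by simpa using htech
          have hnh : pv_is_section_heading l "####" = false := by
            simpa [pv_is_section_heading] using hh
          simp only [List.foldl_cons, pvAStep, pvSegStep, hts, hnh, hh, if_neg,
            Bool.false_eq_true, not_false_eq_true, if_false, List.nil_append]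
          have ih' := ih flag (cur ++ [PySem.Str.strip l]) d t
          rw [pvDescC_snoc, pvTechC_snoc] at ih'
          set s := PySem.Str.strip l with hs
          by_cases hf : flag = true
          · by_cases hb : PySem.Str.startswith s "- " = true
            · have hbC : PySem.Chars.startswith s.toList ['-', ' '] = true := by simpa using hb
              simp only [hf, hb, Bool.true_and, if_pos, if_true]
              simpa [hf, hbC, List.append_assoc] using ih'
            · have hbC : PySem.Chars.startswith s.toList ['-', ' '] = false := by simpa using hb
              simp only [hf, hb, Bool.true_and, if_neg, Bool.false_eq_true,
                not_false_eq_true, if_true, if_false]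
              simpa [hf, hbC, List.append_assoc] using ih'
          · have hf' : flag = false := by simpa using hf
            by_cases hp : pv_is_paragraph_line l = true
            · have hdashC : PySem.Chars.startswith s.toList ['-'] = false := by
                by_contra hcon
                have hconC : PySem.Chars.startswith s.toList ['-'] = true := by simpa using hcon
                have hfalse : pv_is_paragraph_line l = false := by
                  simp [pv_is_paragraph_line, ← hs, hconC]
                simp [hfalse] at hp
              have hbC : PySem.Chars.startswith s.toList ['-', ' '] = false := by
                by_contra hcon
                have := pv_chars_trans s.toList ['-', ' '] ['-'] (by decide) (by simpa using hcon)
                simp [this] at hdashC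
              have hb : PySem.Str.startswith s "- " = false := by simpa using hbC
              have hk : pvDescKeep s = true := by
                rw [hs, pvKeep_eq]
                simp [← hs, hp]
              have hitem : pvDescItem s = s := by simp [pvDescItem, hbC]
              simp only [hf', hp, hb, Bool.false_and, if_neg, Bool.false_eq_true,
                not_false_eq_true, if_true, if_false]
              simpa [hf', hk, hitem, List.append_assoc] using ih'
            · have hp' : pv_is_paragraph_line l = false := by simpa using hp
              by_cases hb : PySem.Str.startswith s "- " = true
              · have hbC : PySem.Chars.startswith s.toList ['-', ' '] = true := by simpa using hb
                have hk : pvDescKeep s = true := by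
                  rw [hs, pvKeep_eq]
                  simp [← hs, hbC]
                have hitem : pvDescItem s = PySem.Str.slice s (some 2) none := by
                  simp [pvDescItem, hbC]
                simp only [hf', hp', hb, Bool.false_and, if_neg, Bool.false_eq_true,
                  not_false_eq_true, if_true, if_false]
                simpa [hf', hk, hitem, List.append_assoc] using ih'
              · have hb' : PySem.Str.startswith s "- " = false := by simpa using hb
                have hbC : PySem.Chars.startswith s.toList ['-', ' '] = false := by simpa using hb
                have hk : pvDescKeep s = false := by
                  rw [hs, pvKeep_eq]
                  simp [← hs, hbC, hp']
                simp only [hf', hp', hb', Bool.false_and, if_neg, Bool.false_eq_true,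
                  not_false_eq_true, if_false]
                simpa [hf', hk, List.append_assoc] using ih'

-- ===== VERDICT (by name: the statement is the Claim_ definition above) =====
theorem extract_experience_content_py_spec : Claim_equal_extract_experience_content_py := by
  intro lines _
  unfold Spec_extract_experience_content_py
  unfold extract_experience_content_py extract_experience_content_py_alt pvSegments
  rw [pvCollect_fold]
  have := pvMain lines false [] [] []
  simp [pvDescC, pvTechC] at this
  simp [this, pvDescC, pvTechC]
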